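-- pv_equiv track=rewrite | github.com/databricks-edu/build-tooling | db_edu_util/db_edu_util/__init__.py | squeeze_blank_lines
-- ===== SOURCE A (Python) =====
-- from itertools import dropwhile
--
-- def squeeze_blank_lines(s: str) -> str:
--     """
--     Squeeze multiple blank lines to a single blank line. Also gets rid of
--     any leading blank lines.
--     """
--     saw_blank = False
--     if len(s.strip(' \t')) == 0:
--         return s.strip(' \t')
--
--     buf = []
--     lines = dropwhile(lambda s: len(s.strip()) == 0, s.split('\n'))
--     for line in lines:
--         line = line.strip()
--         if len(line) == 0:
--             if saw_blank:
--                 continue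
--             saw_blank = True
--         else:
--             saw_blank = False
--         buf.append(line)
--
--     res = '\n'.join(buf)
--     if (len(res) > 0) and res[-1] != '\n':
--         res += '\n'
--
--     # Edge case: Nothing but blank lines will look, to the above loop, like an
--     # empty string. If we had at least one input line, make sure there's a
--     # newline.
--     if (len(res) == 0):
--         res += '\n'
--
--     return res
-- ===== SOURCE B (Python) =====
-- from itertools import groupby
--
-- def squeeze_blank_lines(s: str) -> str:
--     """
--     Squeeze multiple blank lines to a single blank line. Also gets rid of
--     any leading blank lines.
--     """
--     t = s.strip(' \t')
--     if len(t) == 0: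
--         return t
--     lines = [l.strip() for l in s.split('\n')]
--     paras = [list(g) for nonblank, g in groupby(lines, key=bool) if nonblank]
--     if not paras:
--         return '\n'
--     return '\n\n'.join('\n'.join(p) for p in paras) + '\n'
-- ===== Notes on version B (the rewrite author's own statement) =====
-- stated objective: idiomatic
-- what changed: Replaces the dropwhile + saw_blank per-line state-machine and its two trailing-newline patch-ups by a paragraph decomposition: group the stripped lines into maximal runs with itertools.groupby(key=bool), keep the non-blank runs, and join the paragraphs with a fixed blank-line separator plus one final newline.
import Mathlib
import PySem

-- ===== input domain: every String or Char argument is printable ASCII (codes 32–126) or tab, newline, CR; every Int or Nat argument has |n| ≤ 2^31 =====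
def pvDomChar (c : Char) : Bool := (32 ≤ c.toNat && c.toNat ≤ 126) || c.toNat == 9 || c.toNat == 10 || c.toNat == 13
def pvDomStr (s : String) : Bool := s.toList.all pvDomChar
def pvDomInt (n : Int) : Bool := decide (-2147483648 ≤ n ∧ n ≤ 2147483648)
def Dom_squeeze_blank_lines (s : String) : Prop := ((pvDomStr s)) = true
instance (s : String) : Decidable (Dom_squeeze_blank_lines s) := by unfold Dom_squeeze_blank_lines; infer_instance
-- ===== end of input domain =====

-- B replaces A's dropwhile + saw_blank state-machine loop and its two trailing-newline patch-ups
-- by a paragraph decomposition (group stripped lines into maximal runs by blankness, keep the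
-- non-blank runs, join paragraphs with a fixed blank line): idiomatic, same cost.

-- ===== PORT A =====
-- the body of A's 'for line in lines' loop, with state (saw_blank, buf)
def squeezeStep (st : Bool × List String) (line : String) : Bool × List String :=
  let line := PySem.Str.strip line
  if PySem.Str.len line = 0 then
    if st.1 then st else (true, st.2 ++ [line])
  else (false, st.2 ++ [line])

def squeeze_blank_lines (s : String) : String :=
  -- s.split('\n') via PySem.Str.split? ('.getD []' never fires: the separator "\n" is nonempty)
  let t := PySem.Str.stripChars s " \t"
  if PySem.Str.len t = 0 then t
  else
    let lines := ((PySem.Str.split? s "\n").getD []).dropWhile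
      (fun l => decide (PySem.Str.len (PySem.Str.strip l) = 0))
    let r := lines.foldl squeezeStep (false, [])
    let res := PySem.Str.join "\n" r.2
    let res := if 0 < PySem.Str.len res ∧ PySem.Str.pyGet? res (-1) ≠ some '\n' then res ++ "\n" else res
    if PySem.Str.len res = 0 then res ++ "\n" else res

-- ===== PORT B =====
-- itertools.groupby(lines, key=bool): maximal runs of lines with equal truthiness
def pvGroups : List String → List (List String)
  | [] => []
  | l :: ls =>
    (l :: ls.takeWhile (fun x => (x != "") == (l != "")))
      :: pvGroups (ls.dropWhile (fun x => (x != "") == (l != "")))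
termination_by L => L.length
decreasing_by
  have := List.length_dropWhile_le (fun x => (x != "") == (l != "")) ls
  simp only [List.length_cons]; omega

def squeeze_blank_lines_alt (s : String) : String :=
  let t := PySem.Str.stripChars s " \t"
  if PySem.Str.len t = 0 then t
  else
    let lines := ((PySem.Str.split? s "\n").getD []).map PySem.Str.strip
    -- [list(g) for nonblank, g in groupby(lines, key=bool) if nonblank]: a group's key is
    -- the truthiness of its first element
    let paras := (pvGroups lines).filter (fun g => (g.headD "") != "")
    if paras.isEmpty then "\n"
    else PySem.Str.join "\n\n" (paras.map (PySem.Str.join "\n")) ++ "\n"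

-- ===== PRECONDITION & SPEC =====
def Spec_squeeze_blank_lines (s : String) (out : String) : Prop := out = squeeze_blank_lines_alt s
instance (s : String) (out : String) : Decidable (Spec_squeeze_blank_lines s out) := by unfold Spec_squeeze_blank_lines; infer_instance

-- ===== CLAIM (what is proved, stated in full; the proofs are below) =====
def Claim_equal_squeeze_blank_lines : Prop := ∀ (s : String), Dom_squeeze_blank_lines s → Spec_squeeze_blank_lines s (squeeze_blank_lines s)

-- ===== LEMMAS AND PROOFS =====

theorem pv_toList_nil_iff (x : String) : x.toList = [] ↔ x = "" := by
  cases x; simp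

theorem pv_str_ext {a b : String} (h : a.toList = b.toList) : a = b :=
  String.toList_inj.mp h

theorem pv_len_zero_iff (x : String) : PySem.Str.len x = 0 ↔ x = "" := by
  rw [PySem.Str.len_eq, ← pv_toList_nil_iff]
  simp

-- A's loop as a structural recursion over the already-stripped lines
def pvMachine : Bool → List String → List String
  | _, [] => []
  | saw, l :: ls =>
    if l = "" then (if saw then pvMachine true ls else "" :: pvMachine true ls)
    else l :: pvMachine false ls

theorem pv_fold_eq_machine (raw : List String) (saw : Bool) (buf : List String) :
    (raw.foldl squeezeStep (saw, buf)).2 = buf ++ pvMachine saw (raw.map PySem.Str.strip) := by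
  induction raw generalizing saw buf with
  | nil => simp [pvMachine]
  | cons l ls ih =>
    simp only [List.foldl_cons, List.map_cons]
    by_cases hl : PySem.Str.strip l = ""
    · have hl2 : PySem.Chars.strip l.toList = [] := by
        rw [← pv_toList_nil_iff] at hl; simpa using hl
      cases saw with
      | true => simp [squeezeStep, pv_len_zero_iff, hl, hl2, pvMachine, ih]
      | false => simp [squeezeStep, pv_len_zero_iff, hl, hl2, pvMachine, ih]
    · have hl2 : ¬ PySem.Chars.strip l.toList = [] := by
        intro hx; apply hl; rw [← pv_toList_nil_iff]; simpa using hx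
      simp [squeezeStep, pv_len_zero_iff, hl, hl2, pvMachine, ih]

theorem pv_pred_ext :
    (fun l => decide (PySem.Str.len (PySem.Str.strip l) = 0)) = (fun l => PySem.Str.strip l == "") := by
  funext l
  simp only [decide_eq_decide, pv_len_zero_iff]
  cases h : PySem.Str.strip l == "" <;> simp_all

theorem pv_machine_true (L : List String) :
    pvMachine true L = pvMachine false (L.dropWhile (fun l => l == "")) := by
  induction L with
  | nil => rfl
  | cons l ls ih =>
    by_cases hl : l = ""
    · simp [pvMachine, hl, ih, List.dropWhile_cons]
    · simp [pvMachine, hl, List.dropWhile_cons]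

theorem pv_endswith_nl (res : String) (h : res ≠ "") :
    PySem.Str.endswith res "\n" = true ↔ res.toList.getLast? = some '\n' := by
  rw [show PySem.Str.endswith res "\n" = PySem.Chars.endswith res.toList "\n".toList from by
        simp [PySem.Str.endswith_eq],
      PySem.Chars.endswith_iff]
  have hne : res.toList ≠ [] := by
    intro hn; exact h ((pv_toList_nil_iff res).mp hn)
  constructor
  · rintro ⟨t, ht⟩
    rw [← ht]
    simp [show ("\n" : String).toList = ['\n'] from rfl]
  · intro hl
    rcases List.getLast?_eq_some_iff.mp hl with ⟨l', hl'⟩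
    exact ⟨l', by simp [hl', show ("\n" : String).toList = ['\n'] from rfl]⟩

theorem pv_tail_eq (res : String) :
    (if PySem.Str.len (if 0 < PySem.Str.len res ∧ PySem.Str.pyGet? res (-1) ≠ some '\n' then res ++ "\n" else res) = 0
     then (if 0 < PySem.Str.len res ∧ PySem.Str.pyGet? res (-1) ≠ some '\n' then res ++ "\n" else res) ++ "\n"
     else (if 0 < PySem.Str.len res ∧ PySem.Str.pyGet? res (-1) ≠ some '\n' then res ++ "\n" else res))
    = (if PySem.Str.endswith res "\n" then res else res ++ "\n") := by
  by_cases h : res = ""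
  · subst h
    norm_num [pv_len_zero_iff]
    decide
  · have hlen : 0 < PySem.Str.len res := by
      rcases lt_or_eq_of_le (by rw [PySem.Str.len_eq]; positivity : (0:Int) ≤ PySem.Str.len res) with h' | h'
      · exact h'
      · exact absurd ((pv_len_zero_iff res).mp h'.symm) h
    have hlen' : 0 < res.length := by
      cases res
      simp_all [pv_toList_nil_iff, List.length_pos_iff]
    by_cases hl : res.toList.getLast? = some '\n'
    · have h1 : PySem.List.pyGet? res.toList (-1) = some '\n' := by
        rw [PySem.List.pyGet?_neg_one]; exact hl
      have hend : PySem.Chars.endswith res.toList ['\n'] = true := by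
        have := (pv_endswith_nl res h).mpr hl
        simpa using this
      simp [h1, hend, h]
    · have h1 : PySem.List.pyGet? res.toList (-1) ≠ some '\n' := by
        rw [PySem.List.pyGet?_neg_one]; exact hl
      have hend : PySem.Chars.endswith res.toList ['\n'] = false := by
        rcases h' : PySem.Str.endswith res "\n" with _ | _
        · simpa using h'
        · exact absurd ((pv_endswith_nl res h).mp h') hl
      have hne : res ++ "\n" ≠ "" := by
        intro hn
        have := congrArg String.toList hn
        simp at this
      simp [h1, hlen', hend]
      omega

-- pieces of s.split('\n') contain no newline
theorem pv_nf_go : ∀ (fuel : Nat) (l cur : List Char) (acc : List (List Char)),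
    l.length < fuel → '\n' ∉ cur → (∀ a ∈ acc, '\n' ∉ a) →
    ∀ p ∈ PySem.Chars.splitOn.go ['\n'] fuel l cur acc, '\n' ∉ p := by
  intro fuel
  induction fuel with
  | zero => intro l cur acc h; omega
  | succ n ih =>
    intro l cur acc hlen hcur hacc p hp
    cases l with
    | nil =>
      simp [PySem.Chars.splitOn.go] at hp
      rcases hp with h | h
      · exact hacc p h
      · subst h; simpa using hcur
    | cons c rest =>
      by_cases hc : c = '\n'
      · subst hc
        rw [show PySem.Chars.splitOn.go ['\n'] (n+1) ('\n' :: rest) cur acc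
              = PySem.Chars.splitOn.go ['\n'] n rest [] (cur.reverse :: acc) from by
              simp [PySem.Chars.splitOn.go, List.isPrefixOf]] at hp
        refine ih rest [] _ (by simpa using hlen) (by simp) ?_ p hp
        intro a ha
        rcases List.mem_cons.mp ha with h | h
        · subst h; simpa using hcur
        · exact hacc a h
      · rw [show PySem.Chars.splitOn.go ['\n'] (n+1) (c :: rest) cur acc
              = PySem.Chars.splitOn.go ['\n'] n rest (c :: cur) acc from by
              simp [PySem.Chars.splitOn.go, List.isPrefixOf,
                    show ('\n' = c) = False from by simp [Ne.symm hc]]] at hp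
        refine ih rest (c :: cur) acc (by simpa using hlen) ?_ hacc p hp
        simp [hcur, Ne.symm hc]

theorem pv_nf_splitOn (s : List Char) : ∀ p ∈ PySem.Chars.splitOn s ['\n'], '\n' ∉ p := by
  unfold PySem.Chars.splitOn
  exact pv_nf_go (s.length + 1) s [] [] (by omega) (by simp) (by simp)

theorem pv_strip_mem {c : Char} {p : List Char} (h : c ∈ PySem.Chars.strip p) : c ∈ p := by
  unfold PySem.Chars.strip PySem.Chars.rstrip PySem.Chars.lstrip at h
  rw [List.mem_reverse] at h
  have h1 := (List.dropWhile_sublist _).mem h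
  rw [List.mem_reverse] at h1
  exact (List.dropWhile_sublist _).mem h1

theorem pv_nf_lines (s : String) :
    ∀ l ∈ ((PySem.Str.split? s "\n").getD []).map PySem.Str.strip, '\n' ∉ l.toList := by
  intro l hl
  rcases List.mem_map.mp hl with ⟨r, hr, rfl⟩
  rw [PySem.Str.toList_strip]
  intro hc
  have hc' := pv_strip_mem hc
  have hsplit : PySem.Str.split? s "\n" = some ((PySem.Chars.splitOn s.toList ['\n']).map String.ofList) := by
    simp [PySem.Str.split?, PySem.Chars.split?]
  rw [hsplit] at hr
  simp only [Option.getD_some] at hr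
  rcases List.mem_map.mp hr with ⟨p, hp, rfl⟩
  have hop : (String.ofList p).toList = p := by simp
  rw [hop] at hc'
  exact pv_nf_splitOn s.toList p hp hc'

-- ---- group facts ----
theorem pv_groups_ne_nil : ∀ (L : List String), ∀ g ∈ pvGroups L, g ≠ [] := by
  intro L
  induction L using pvGroups.induct with
  | case1 => simp [pvGroups]
  | case2 l ls ih =>
    rw [pvGroups]
    intro g hg
    rcases List.mem_cons.mp hg with rfl | h
    · simp
    · exact ih g h

theorem pv_groups_mem : ∀ (L : List String), ∀ g ∈ pvGroups L, ∀ x ∈ g, x ∈ L := by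
  intro L
  induction L using pvGroups.induct with
  | case1 => simp [pvGroups]
  | case2 l ls ih =>
    rw [pvGroups]
    intro g hg x hx
    rcases List.mem_cons.mp hg with rfl | h
    · rcases List.mem_cons.mp hx with rfl | h'
      · exact List.mem_cons_self
      · exact List.mem_cons_of_mem _ ((List.takeWhile_sublist _).mem h')
    · exact List.mem_cons_of_mem _ ((List.dropWhile_sublist _).mem (ih g h x hx))

theorem pv_groups_homog : ∀ (L : List String), ∀ g ∈ pvGroups L, ∀ x ∈ g, (x != "") = ((g.headD "") != "") := by
  intro L
  induction L using pvGroups.induct with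
  | case1 => simp [pvGroups]
  | case2 l ls ih =>
    rw [pvGroups]
    intro g hg x hx
    rcases List.mem_cons.mp hg with rfl | h
    · rcases List.mem_cons.mp hx with rfl | h'
      · simp
      · have := List.mem_takeWhile_imp h'
        simpa using this
    · exact ih g h x hx

def pvParas (L : List String) : List (List String) :=
  (pvGroups L).filter (fun g => (g.headD "") != "")


theorem pv_paras_nonblank (L : List String) : ∀ g ∈ pvParas L, ∀ x ∈ g, x ≠ "" := by
  intro g hg x hx
  rcases List.mem_filter.mp hg with ⟨hg', hk⟩
  have := pv_groups_homog L g hg' x hx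
  intro hx0
  rw [hx0] at this
  rw [← this] at hk
  simp at hk

theorem pv_pred_blank : (fun x : String => (x != "") == (("":String) != "")) = (fun x : String => x == "") := by
  funext x
  cases h : x == "" <;> simp_all

theorem pv_pred_nonblank {l : String} (hl : l ≠ "") :
    (fun x : String => (x != "") == (l != "")) = (fun x : String => x != "") := by
  funext x
  have : (l != "") = true := by simpa using hl
  rw [this]
  cases h : x == "" <;> simp_all

theorem pv_paras_blank_cons (ls : List String) :
    pvParas ("" :: ls) = pvParas (ls.dropWhile (fun x => x == "")) := by
  unfold pvParas
  rw [pvGroups, pv_pred_blank]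
  simp [List.filter_cons]

theorem pv_paras_dropWhile (L : List String) :
    pvParas (L.dropWhile (fun x => x == "")) = pvParas L := by
  cases L with
  | nil => rfl
  | cons l ls =>
    by_cases hl : l = ""
    · subst hl
      rw [List.dropWhile_cons_of_pos (by simp), pv_paras_blank_cons]
    · rw [List.dropWhile_cons_of_neg (by simpa using hl)]

theorem pv_inter_cons₂ {α : Type} (sep x y : List α) (t : List (List α)) :
    List.intercalate sep (x :: y :: t) = x ++ sep ++ List.intercalate sep (y :: t) := by
  simp [List.intercalate, List.intersperse]

theorem pv_inter_cons' {α : Type} (sep x : List α) (T : List (List α)) (h : T ≠ []) :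
    List.intercalate sep (x :: T) = x ++ sep ++ List.intercalate sep T := by
  cases T with
  | nil => exact absurd rfl h
  | cons y t => exact pv_inter_cons₂ sep x y t

theorem pv_inter_append {α : Type} (sep : List α) (xs : List (List α)) (T : List (List α))
    (hx : xs ≠ []) (hT : T ≠ []) :
    List.intercalate sep (xs ++ T) = List.intercalate sep xs ++ sep ++ List.intercalate sep T := by
  induction xs with
  | nil => exact absurd rfl hx
  | cons x xs' ih =>
    cases xs' with
    | nil => simpa [List.intercalate, List.intersperse] using pv_inter_cons' sep x T hT
    | cons y t =>
      rw [List.cons_append, pv_inter_cons' sep x ((y :: t) ++ T) (by simp), ih (by simp),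
          pv_inter_cons₂]
      simp

theorem pv_map_intercalate {α β : Type} (f : α → β) (sep : List α) (P : List (List α)) :
    (List.intercalate sep P).map f = List.intercalate (sep.map f) (P.map (List.map f)) := by
  induction P with
  | nil => simp [List.intercalate]
  | cons p ps ih =>
    cases ps with
    | nil => simp [List.intercalate]
    | cons q t =>
      rw [pv_inter_cons₂, List.map_cons, List.map_cons, pv_inter_cons₂]
      simp [ih]

theorem pv_k3 : ∀ (Pc : List (List (List Char))), (∀ g ∈ Pc, g ≠ []) →
    List.intercalate ['\n'] (List.intercalate [[]] Pc)
      = List.intercalate ['\n', '\n'] (Pc.map (List.intercalate ['\n'])) := by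
  intro Pc
  induction Pc with
  | nil => simp [List.intercalate]
  | cons g Ps ih =>
    intro hne
    cases Ps with
    | nil => simp [List.intercalate]
    | cons g2 Pt =>
      have hg : g ≠ [] := hne g (by simp)
      have hg2 : g2 ≠ [] := hne g2 (by simp)
      have hT : List.intercalate [[]] (g2 :: Pt) ≠ [] := by
        rcases g2 with _ | ⟨y, g2'⟩
        · exact absurd rfl hg2
        · cases Pt with
          | nil => simp [List.intercalate]
          | cons w ws =>
            rw [pv_inter_cons₂]
            simp
      have e1 : List.intercalate [[]] (g :: g2 :: Pt) = g ++ ([] :: List.intercalate [[]] (g2 :: Pt)) := by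
        rw [pv_inter_cons' [[]] g (g2 :: Pt) (by simp)]; simp
      rw [e1, pv_inter_append ['\n'] g ([] :: List.intercalate [[]] (g2 :: Pt)) hg (by simp),
          pv_inter_cons' ['\n'] [] _ hT, List.map_cons,
          pv_inter_cons' ['\n','\n'] _ _ (by simp), ih (fun x hx => hne x (by simp [hx]))]
      simp

theorem pv_last_inter (W : List (List Char)) (ac : List Char) (h : ac ≠ []) :
    (List.intercalate ['\n'] (W ++ [ac])).getLast? = ac.getLast? := by
  induction W with
  | nil => simp [List.intercalate]
  | cons w ws ih =>
    rw [List.cons_append, pv_inter_cons' _ _ _ (by simp), List.getLast?_append,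
        List.getLast?_append, ih]
    rcases List.exists_cons_of_ne_nil h with ⟨a, t, rfl⟩
    cases hlast : (a :: t).getLast? with
    | none => simp at hlast
    | some z => simp

def pvTr (L : List String) : List String := if L.getLast? = some "" then [""] else []

theorem pv_inter_head {α : Type} (sep : List α) (l : α) (p : List α) (F : List (List α)) :
    List.intercalate sep ((l :: p) :: F) = l :: List.intercalate sep (p :: F) := by
  cases F with
  | nil => simp [List.intercalate, List.intersperse]
  | cons f fs => rw [pv_inter_cons₂, pv_inter_cons₂]; simp

theorem pv_head_dropWhile {α : Type} (p : α → Bool) (l : List α) (x : α)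
    (h : (List.dropWhile p l).head? = some x) : p x = false := by
  induction l with
  | nil => simp at h
  | cons a t ih =>
    by_cases hp : p a
    · simp [hp] at h; exact ih h
    · simp [hp] at h; subst h; simpa using hp

theorem pv_getLast?_cons_ne_nil {α : Type} (a : α) (l : List α) (h : l ≠ []) :
    (a :: l).getLast? = l.getLast? := by
  rcases List.exists_cons_of_ne_nil h with ⟨b, t, rfl⟩
  rw [show a :: b :: t = [a] ++ (b :: t) from rfl, List.getLast?_append]
  cases hlast : (b :: t).getLast? with
  | none => simp at hlast
  | some z => simp

theorem pv_getLast?_suffix {α : Type} {l₀ l : List α} (hs : l₀ <:+ l) (h : l₀ ≠ []) :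
    l.getLast? = l₀.getLast? := by
  rcases hs with ⟨pre, rfl⟩
  rw [List.getLast?_append]
  rcases List.exists_cons_of_ne_nil h with ⟨b, t, rfl⟩
  cases hlast : (b :: t).getLast? with
  | none => simp at hlast
  | some z => simp

theorem pv_machine_paras : ∀ (n : Nat) (L : List String), L.length ≤ n →
    (L = [] ∨ ∃ l ls, L = l :: ls ∧ l ≠ "") →
    pvMachine false L = List.intercalate [""] (pvParas L) ++ pvTr L := by
  intro n
  induction n with
  | zero =>
    intro L hlen _
    have : L = [] := List.length_eq_zero_iff.mp (Nat.le_zero.mp hlen)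
    subst this
    simp [pvMachine, pvParas, pvGroups, pvTr, List.intercalate]
  | succ n ih =>
    intro L hlen hshape
    rcases hshape with rfl | ⟨l, ls, rfl, hl⟩
    · simp [pvMachine, pvParas, pvGroups, pvTr, List.intercalate]
    cases ls with
    | nil =>
      simp [pvMachine, hl, pvParas, pvGroups, pvTr, List.intercalate,
            show (l != "") = true from by simpa using hl, hl]
    | cons m ls'' =>
      by_cases hm : m = ""
      · subst hm
        -- L = l :: "" :: ls''
        have hM : pvMachine false (l :: "" :: ls'') =
            l :: "" :: pvMachine false (ls''.dropWhile (fun x => x == "")) := by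
          simp [pvMachine, hl, pv_machine_true]
        have hP : pvParas (l :: "" :: ls'') = [l] :: pvParas (ls''.dropWhile (fun x => x == "")) := by
          unfold pvParas
          rw [pvGroups, pv_pred_nonblank hl]
          rw [show List.takeWhile (fun x => x != "") ("" :: ls'') = [] from by simp,
              show List.dropWhile (fun x => x != "") ("" :: ls'') = "" :: ls'' from by simp]
          rw [List.filter_cons_of_pos (by simpa using hl)]
          have := pv_paras_blank_cons ls''
          unfold pvParas at this
          rw [this]
        set ls₀ := ls''.dropWhile (fun x => x == "") with hls₀
        have hIH : pvMachine false ls₀ = List.intercalate [""] (pvParas ls₀) ++ pvTr ls₀ := by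
          apply ih ls₀
          · have h1 := List.length_dropWhile_le (fun x : String => x == "") ls''
            rw [← hls₀] at h1
            simp at hlen
            omega
          · cases h0 : ls₀ with
            | nil => exact Or.inl rfl
            | cons x xs =>
              refine Or.inr ⟨x, xs, rfl, ?_⟩
              have := pv_head_dropWhile (fun x : String => x == "") ls'' x (by rw [← hls₀, h0]; rfl)
              simpa using this
        cases h0 : ls₀ with
        | nil =>
          have hall : ∀ x ∈ ls'', x = "" := by
            intro x hx
            have h0' : List.dropWhile (fun x : String => x == "") ls'' = [] := by
              rw [← hls₀]; exact h0
            have := List.dropWhile_eq_nil_iff.mp h0'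
            simpa using this x hx
          have hTr : pvTr (l :: "" :: ls'') = [""] := by
            unfold pvTr
            rcases List.eq_nil_or_concat ls'' with rfl | ⟨pre, a, rfl⟩
            · simp
            · have ha : a = "" := hall a (by simp)
              have hgl : (l :: "" :: pre.concat a).getLast? = some a := by
                rw [show l :: "" :: pre.concat a = (l :: "" :: pre) ++ [a] from by simp]
                exact List.getLast?_concat
              rw [hgl, ha]
              simp
          rw [hM, hP, h0, hTr]
          simp [pvParas, pvGroups, pvMachine, List.intercalate]
        | cons x xs =>
          have hx : x ≠ "" := by
            have := pv_head_dropWhile (fun x : String => x == "") ls'' x (by rw [← hls₀, h0]; rfl)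
            simpa using this
          have hPne : pvParas ls₀ ≠ [] := by
            rw [h0]
            unfold pvParas
            rw [pvGroups, pv_pred_nonblank hx, List.filter_cons_of_pos (by simpa using hx)]
            simp
          have hTr : pvTr (l :: "" :: ls'') = pvTr ls₀ := by
            unfold pvTr
            have hls'' : ls'' ≠ [] := by
              intro hc; rw [hc] at hls₀; simp [hls₀] at h0
            have h1 : (l :: "" :: ls'').getLast? = ls''.getLast? := by
              rw [pv_getLast?_cons_ne_nil _ _ (by simp [hls''] : ("" :: ls'') ≠ []),
                  pv_getLast?_cons_ne_nil _ _ hls'']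
            have h2 : ls''.getLast? = ls₀.getLast? :=
              pv_getLast?_suffix (hls₀ ▸ List.dropWhile_suffix _) (by rw [h0]; simp)
            rw [h1, h2]
          rw [hM, hIH, hP, hTr,
              pv_inter_cons' [""] [l] (pvParas ls₀) hPne]
          simp
      · -- L = l :: m :: ls'', m ≠ ""
        have hM : pvMachine false (l :: m :: ls'') = l :: pvMachine false (m :: ls'') := by
          simp [pvMachine, hl]
        have hIH : pvMachine false (m :: ls'') =
            List.intercalate [""] (pvParas (m :: ls'')) ++ pvTr (m :: ls'') := by
          apply ih
          · simpa using Nat.le_of_succ_le_succ hlen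
          · exact Or.inr ⟨m, ls'', rfl, hm⟩
        have hP : ∃ tw F, pvParas (l :: m :: ls'') = (l :: m :: tw) :: F ∧
            pvParas (m :: ls'') = (m :: tw) :: F := by
          refine ⟨ls''.takeWhile (fun x => x != ""),
            (pvGroups (ls''.dropWhile (fun x => x != ""))).filter (fun g => (g.headD "") != ""), ?_, ?_⟩
          · unfold pvParas
            rw [pvGroups, pv_pred_nonblank hl,
                show List.takeWhile (fun x => x != "") (m :: ls'') = m :: ls''.takeWhile (fun x => x != "") from by
                  simp [List.takeWhile_cons, show (m != "") = true from by simpa using hm],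
                show List.dropWhile (fun x => x != "") (m :: ls'') = ls''.dropWhile (fun x => x != "") from by
                  simp [List.dropWhile_cons, show (m != "") = true from by simpa using hm]]
            rw [List.filter_cons_of_pos (by simpa using hl)]
          · unfold pvParas
            rw [pvGroups, pv_pred_nonblank hm]
            rw [List.filter_cons_of_pos (by simpa using hm)]
        rcases hP with ⟨tw, F, hP1, hP2⟩
        have hTr : pvTr (l :: m :: ls'') = pvTr (m :: ls'') := by
          unfold pvTr
          rw [pv_getLast?_cons_ne_nil _ _ (by simp : (m :: ls'') ≠ [])]
        rw [hM, hIH, hP1, hP2, hTr, pv_inter_head, pv_inter_head]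
        rw [pv_inter_head]
        simp

-- ===== VERDICT (by name: the statement is the Claim_ definition above) =====
theorem squeeze_blank_lines_spec : Claim_equal_squeeze_blank_lines := by
  intro s _
  unfold Spec_squeeze_blank_lines squeeze_blank_lines squeeze_blank_lines_alt
  by_cases hguard : PySem.Str.len (PySem.Str.stripChars s " \t") = 0
  · simp only [hguard, if_pos rfl, if_true]
  · simp only [if_neg hguard]
    set raw := (PySem.Str.split? s "\n").getD [] with hraw
    set lines := raw.map PySem.Str.strip with hlines
    have hbuf : ((raw.dropWhile (fun l => decide (PySem.Str.len (PySem.Str.strip l) = 0))).foldl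
        squeezeStep (false, [])).2
        = pvMachine false (lines.dropWhile (fun x => x == "")) := by
      rw [pv_fold_eq_machine, pv_pred_ext]
      have h1 : raw.dropWhile (fun l => PySem.Str.strip l == "")
          = raw.dropWhile ((fun l => l == "") ∘ PySem.Str.strip) := rfl
      rw [h1, ← List.dropWhile_map (f := PySem.Str.strip) (p := fun l => l == "")]
      simp [hlines]
    rw [hbuf]
    set L₀ := lines.dropWhile (fun x => x == "") with hL₀
    have hshape : L₀ = [] ∨ ∃ l ls, L₀ = l :: ls ∧ l ≠ "" := by
      cases h0 : L₀ with
      | nil => exact Or.inl rfl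
      | cons x xs =>
        refine Or.inr ⟨x, xs, rfl, ?_⟩
        have := pv_head_dropWhile (fun x : String => x == "") lines x (by rw [← hL₀, h0]; rfl)
        simpa using this
    have hm := pv_machine_paras L₀.length L₀ le_rfl hshape
    have hpp : pvParas L₀ = pvParas lines := by rw [hL₀]; exact pv_paras_dropWhile lines
    rw [hm, hpp, pv_tail_eq]
    have hparas : ((pvGroups lines).filter (fun g => (g.headD "") != "")) = pvParas lines := rfl
    rw [hparas]
    -- facts about the paragraphs
    have hgne : ∀ g ∈ pvParas lines, g ≠ [] := by
      intro g hg
      exact pv_groups_ne_nil lines g (List.mem_filter.mp hg).1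
    have hnb := pv_paras_nonblank lines
    have hnf : ∀ g ∈ pvParas lines, ∀ x ∈ g, '\n' ∉ x.toList := by
      intro g hg x hx
      exact pv_nf_lines s x (pv_groups_mem lines g (List.mem_filter.mp hg).1 x hx)
    cases hp : pvParas lines with
    | nil =>
      have hL0nil : L₀ = [] := by
        rcases hshape with h0 | ⟨l, ls, h0, hl⟩
        · exact h0
        · exfalso
          have : pvParas L₀ ≠ [] := by
            rw [h0]
            unfold pvParas
            rw [pvGroups, pv_pred_nonblank hl, List.filter_cons_of_pos (by simpa using hl)]
            simp
          rw [hpp, hp] at this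
          exact this rfl
      have hres : PySem.Str.join "\n" (List.intercalate [""] ([] : List (List String)) ++ pvTr L₀) = "" := by
        rw [hL0nil]
        apply pv_str_ext
        rw [PySem.Str.toList_join]
        simp [List.intercalate, pvTr, PySem.Chars.join]
      rw [hres]
      have : PySem.Str.endswith "" "\n" = false := by decide
      rw [this]
      simp only [Bool.false_eq_true, if_false, List.isEmpty_nil, if_pos rfl, if_true]
      apply pv_str_ext
      simp
    | cons p ps =>
      simp only [List.isEmpty_cons, Bool.false_eq_true, if_false]
      -- abbreviations
      set I : List String := List.intercalate [""] (p :: ps) with hI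
      set Pc : List (List (List Char)) := (p :: ps).map (List.map String.toList) with hPc
      set X : List Char := List.intercalate ['\n'] (I.map String.toList) with hX
      have hpP : p ∈ pvParas lines := by rw [hp]; exact List.mem_cons_self
      have hpne : p ≠ [] := hgne p hpP
      have hIne : I ≠ [] := by
        rw [hI]
        cases ps with
        | nil =>
          simpa [List.intercalate] using hpne
        | cons q qs =>
          rw [pv_inter_cons₂]
          intro hc
          rcases List.exists_cons_of_ne_nil hpne with ⟨a, t, rfl⟩
          simp at hc
      -- B's join equals X
      have hBX : (PySem.Str.join "\n\n" ((p :: ps).map (PySem.Str.join "\n"))).toList = X := by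
        rw [PySem.Str.toList_join]
        have h2 : ((p :: ps).map (PySem.Str.join "\n")).map String.toList
            = Pc.map (List.intercalate ['\n']) := by
          rw [hPc, List.map_map, List.map_map]
          apply List.map_congr_left
          intro g _
          simp [PySem.Str.toList_join, PySem.Chars.join]
        rw [h2, PySem.Chars.join]
        have h3 : ∀ g ∈ Pc, g ≠ [] := by
          intro g hg
          rcases List.mem_map.mp hg with ⟨q, hq, rfl⟩
          have : q ≠ [] := hgne q (by rw [hp]; exact hq)
          simpa using this
        have h4 := pv_k3 Pc h3
        rw [hX, hI]
        rw [pv_map_intercalate String.toList [""] (p :: ps)]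
        have h5 : (([""] : List String).map String.toList) = [[]] := by simp
        rw [h5, ← hPc, h4]
        rfl
      -- res's characters
      have hres : (PySem.Str.join "\n" (I ++ pvTr L₀)).toList
          = List.intercalate ['\n'] ((I ++ pvTr L₀).map String.toList) := by
        rw [PySem.Str.toList_join]; rfl
      by_cases htr : L₀.getLast? = some ""
      · -- trailing blank: res already ends with newline
        have htr' : pvTr L₀ = [""] := by unfold pvTr; rw [if_pos htr]
        have hresX : (PySem.Str.join "\n" (I ++ pvTr L₀)).toList = X ++ ['\n'] := by
          rw [hres, htr']
          rw [List.map_append, pv_inter_append ['\n'] (I.map String.toList) ([""].map String.toList)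
              (by simpa using hIne) (by simp)]
          simp [hX, List.intercalate]
        have hne : PySem.Str.join "\n" (I ++ pvTr L₀) ≠ "" := by
          intro hc
          rw [hc] at hresX
          simp at hresX
        have hend : PySem.Str.endswith (PySem.Str.join "\n" (I ++ pvTr L₀)) "\n" = true := by
          rw [pv_endswith_nl _ hne, hresX]
          exact List.getLast?_concat
        rw [hend]
        simp only [if_pos rfl, if_true]
        apply pv_str_ext
        simp only [String.toList_append, hresX, hBX]
        simp
      · -- no trailing blank: A appends the newline
        have htr' : pvTr L₀ = [] := by unfold pvTr; rw [if_neg htr]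
        have hresX : (PySem.Str.join "\n" (I ++ pvTr L₀)).toList = X := by
          rw [hres, htr']
          simp [hX]
        -- the last line of I is non-blank and newline-free
        obtain ⟨a, ha_ne, ha_nf, ⟨I', hI'⟩⟩ :
            ∃ a, a ≠ "" ∧ '\n' ∉ a.toList ∧ ∃ I', I = I' ++ [a] := by
          rcases List.eq_nil_or_concat (p :: ps) with hPnil | ⟨Q, q, hQ⟩
          · simp at hPnil
          · rw [List.concat_eq_append] at hQ
            have hqP : q ∈ pvParas lines := by rw [hp, hQ]; simp
            have hqne : q ≠ [] := hgne q hqP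
            rcases List.eq_nil_or_concat q with h | ⟨q', a, hq'⟩
            · exact absurd h hqne
            · rw [List.concat_eq_append] at hq'
              have haq : a ∈ q := by rw [hq']; simp
              refine ⟨a, hnb q hqP a haq, hnf q hqP a haq, ?_⟩
              have hlast : I.getLast? = some a := by
                rw [hI, hQ]
                cases Q with
                | nil =>
                  simp only [List.nil_append]
                  rw [show List.intercalate ([""] : List String) [q] = q from by
                        simp [List.intercalate]]
                  rw [hq']
                  exact List.getLast?_concat
                | cons w ws =>
                  rw [pv_inter_append [""] (w :: ws) [q] (by simp) (by simp),
                      show List.intercalate ([""] : List String) [q] = q from by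
                        simp [List.intercalate]]
                  rw [List.getLast?_append, hq', List.getLast?_concat]
                  rfl
              rcases List.getLast?_eq_some_iff.mp hlast with ⟨I', hI'⟩
              exact ⟨I', hI'⟩
        have hXlast : X.getLast? = a.toList.getLast? := by
          rw [hX, hI', List.map_append]
          exact pv_last_inter (I'.map String.toList) a.toList
            (fun h => ha_ne ((pv_toList_nil_iff a).mp h))
        have haL : a.toList ≠ [] := by
          intro hc; exact ha_ne ((pv_toList_nil_iff a).mp hc)
        obtain ⟨c, hc⟩ : ∃ c, a.toList.getLast? = some c := by
          rcases List.exists_cons_of_ne_nil haL with ⟨b, t, hbt⟩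
          rw [hbt]
          cases h : (b :: t).getLast? with
          | none => simp at h
          | some z => exact ⟨z, rfl⟩
        have hcne : c ≠ '\n' := fun hcc => ha_nf (hcc ▸ List.mem_of_getLast? hc)
        have hXne : X ≠ [] := by
          intro hXnil
          rw [hXnil] at hXlast
          rw [hc] at hXlast
          simp at hXlast
        have hne : PySem.Str.join "\n" (I ++ pvTr L₀) ≠ "" := by
          intro hcc
          rw [hcc] at hresX
          exact hXne hresX.symm
        have hend : PySem.Str.endswith (PySem.Str.join "\n" (I ++ pvTr L₀)) "\n" = false := by
          rcases h : PySem.Str.endswith (PySem.Str.join "\n" (I ++ pvTr L₀)) "\n" with _ | _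
          · rfl
          · exfalso
            have := (pv_endswith_nl _ hne).mp h
            rw [hresX, hXlast, hc] at this
            exact hcne (Option.some.inj this)
        rw [hend]
        simp only [Bool.false_eq_true, if_false]
        apply pv_str_ext
        simp only [String.toList_append, hresX, hBX]
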